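-- pv_equiv track=rewrite | github.com/huntorochi/TreeFormer | valid_smd_guyot_nx.py | find_segments_v2
-- ===== SOURCE A (Python) =====
-- def find_segments_v2(start_node, node_collections, branching_nodes, end_nodes):
--     segments = []
--     visited_nodes = set()
--
--     def dfs(node, path):
--         visited_nodes.add(node)
--         path.append(node)
--
--         if node in branching_nodes:
--             segments.append(path.copy())
--             # 继续探索分歧节点的每个邻居，从分歧节点开始新的路径
--             for collection in node_collections:
--                 if node in collection:
--                     for neighbor in collection:
--                         if neighbor not in visited_nodes:
--                             dfs(neighbor, [node])
--             return
--
--         if node in end_nodes: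
--             segments.append(path.copy())
--             return
--
--         for collection in node_collections:
--             if node in collection:
--                 for neighbor in collection:
--                     if neighbor not in visited_nodes:
--                         dfs(neighbor, path.copy())
--
--     dfs(start_node, [])
--
--     return segments
-- ===== SOURCE B (Python) =====
-- def find_segments_v2(start_node, node_collections, branching_nodes, end_nodes):
--     # Precompute a flat neighbor list per node (concatenation of every collection
--     # containing it, in original order), then one merged exploration loop.
--     nbrs = {}
--     for collection in node_collections:
--         for n in dict.fromkeys(collection):
--             nbrs.setdefault(n, []).extend(collection)
--
--     segments = []
--     visited = set()
--
--     def dfs(node, path):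
--         visited.add(node)
--         path = path + [node]
--         if node in branching_nodes:
--             segments.append(path)
--             path = [node]
--         elif node in end_nodes:
--             segments.append(path)
--             return
--         for nb in nbrs.get(node, []):
--             if nb not in visited:
--                 dfs(nb, path)
--
--     dfs(start_node, [])
--     return segments
-- ===== Notes on version B (the rewrite author's own statement) =====
-- stated objective: alternative
-- what changed: B precomputes one flat neighbor list per node (node -> concatenation of the collections containing it) and runs a single merged exploration loop, instead of A's rescan of every collection with nested membership loops at each visited node (and A's two copies of that loop).
import Mathlib
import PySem

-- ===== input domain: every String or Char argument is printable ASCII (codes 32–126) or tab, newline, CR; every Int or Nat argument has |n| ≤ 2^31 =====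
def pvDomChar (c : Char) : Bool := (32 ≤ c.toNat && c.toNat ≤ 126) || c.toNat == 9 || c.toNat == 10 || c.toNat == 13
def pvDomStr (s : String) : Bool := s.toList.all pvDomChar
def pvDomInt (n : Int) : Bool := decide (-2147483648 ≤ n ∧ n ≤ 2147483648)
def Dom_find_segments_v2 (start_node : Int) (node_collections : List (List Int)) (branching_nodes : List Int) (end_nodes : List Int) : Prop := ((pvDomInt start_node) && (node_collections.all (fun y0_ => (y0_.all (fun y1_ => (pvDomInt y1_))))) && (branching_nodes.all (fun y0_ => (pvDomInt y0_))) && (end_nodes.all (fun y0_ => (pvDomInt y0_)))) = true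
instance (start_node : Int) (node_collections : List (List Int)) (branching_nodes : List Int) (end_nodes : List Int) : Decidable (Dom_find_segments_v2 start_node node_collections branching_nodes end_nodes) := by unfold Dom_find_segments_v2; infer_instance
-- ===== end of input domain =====

-- B precomputes a flat neighbor list per node and explores with one merged loop,
-- instead of A's per-node rescan of all collections (two copies of a nested loop).

-- ===== PORT A =====
-- state carried by the Python closure: (segments, visited_nodes); the fuel only
-- makes the recursion total in Lean (ncs.flatten.length + 1 always suffices: each
-- nested call visits a fresh node and all nodes beyond the start lie in ncs.flatten).
def dfsA (ncs : List (List Int)) (bns ens : List Int) :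
    Nat → Int → List Int → List (List Int) × PySem.Set Int → List (List Int) × PySem.Set Int
  | 0, _, _, st => st
  | fuel+1, node, path, st =>
    let visited := PySem.Set.add st.2 node
    let path := path ++ [node]
    if bns.contains node then
      -- segments.append(path.copy()); then rescan all collections from this node
      ncs.foldl (fun st collection =>
        if collection.contains node then
          collection.foldl (fun st neighbor =>
            if PySem.Set.contains st.2 neighbor then st
            else dfsA ncs bns ens fuel neighbor [node] st) st
        else st) (st.1 ++ [path], visited)
    else if ens.contains node then
      (st.1 ++ [path], visited)
    else
      ncs.foldl (fun st collection =>
        if collection.contains node then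
          collection.foldl (fun st neighbor =>
            if PySem.Set.contains st.2 neighbor then st
            else dfsA ncs bns ens fuel neighbor path st) st
        else st) (st.1, visited)

def find_segments_v2 (start_node : Int) (node_collections : List (List Int)) (branching_nodes : List Int) (end_nodes : List Int) : List (List Int) :=
  (dfsA node_collections branching_nodes end_nodes
    (node_collections.flatten.length + 1) start_node [] ([], PySem.Set.empty)).1

-- ===== PORT B =====
-- nbrs.setdefault(n, []).extend(collection) for n in dict.fromkeys(collection)
def buildNbrs (ncs : List (List Int)) : PySem.Dict Int (List Int) :=
  ncs.foldl (fun nbrs collection =>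
    (PySem.List.dedup collection).foldl
      (fun nbrs n => nbrs.insert n (nbrs.getD n [] ++ collection)) nbrs)
    PySem.Dict.empty

-- single merged loop: a branching node appends and restarts the path, an end node
-- appends and stops, otherwise the path continues; same fuel device as dfsA.
def dfsB (nbrs : PySem.Dict Int (List Int)) (bns ens : List Int) :
    Nat → Int → List Int → List (List Int) × PySem.Set Int → List (List Int) × PySem.Set Int
  | 0, _, _, st => st
  | fuel+1, node, path, st =>
    let visited := PySem.Set.add st.2 node
    let p := path ++ [node]
    let branch := bns.contains node
    if !branch && ens.contains node then
      (st.1 ++ [p], visited)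
    else
      (nbrs.getD node []).foldl
        (fun st nb =>
          if PySem.Set.contains st.2 nb then st
          else dfsB nbrs bns ens fuel nb (if branch then [node] else p) st)
        (if branch then st.1 ++ [p] else st.1, visited)

def find_segments_v2_alt (start_node : Int) (node_collections : List (List Int)) (branching_nodes : List Int) (end_nodes : List Int) : List (List Int) :=
  (dfsB (buildNbrs node_collections) branching_nodes end_nodes
    (node_collections.flatten.length + 1) start_node [] ([], PySem.Set.empty)).1

-- ===== PRECONDITION & SPEC =====
def Spec_find_segments_v2 (start_node : Int) (node_collections : List (List Int)) (branching_nodes : List Int) (end_nodes : List Int) (out : List (List Int)) : Prop := out = find_segments_v2_alt start_node node_collections branching_nodes end_nodes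
instance (start_node : Int) (node_collections : List (List Int)) (branching_nodes : List Int) (end_nodes : List Int) (out : List (List Int)) : Decidable (Spec_find_segments_v2 start_node node_collections branching_nodes end_nodes out) := by unfold Spec_find_segments_v2; infer_instance

-- ===== CLAIM =====
def Claim_equal_find_segments_v2 : Prop := ∀ (start_node : Int) (node_collections : List (List Int)) (branching_nodes : List Int) (end_nodes : List Int), Dom_find_segments_v2 start_node node_collections branching_nodes end_nodes → Spec_find_segments_v2 start_node node_collections branching_nodes end_nodes (find_segments_v2 start_node node_collections branching_nodes end_nodes)

-- ===== LEMMAS AND PROOFS =====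

-- one collection's pass over buildNbrs's inner fold, for a duplicate-free key list L
lemma getD_inner_fold (col : List Int) :
    ∀ (L : List Int) (nbrs : PySem.Dict Int (List Int)) (node : Int), L.Nodup →
      (L.foldl (fun nbrs n => nbrs.insert n (nbrs.getD n [] ++ col)) nbrs).getD node []
        = nbrs.getD node [] ++ (if L.contains node then col else []) := by
  intro L
  induction L with
  | nil => intro nbrs node _; simp
  | cons n L ih =>
    intro nbrs node hnd
    rcases List.nodup_cons.mp hnd with ⟨hn, hL⟩
    simp only [List.foldl_cons]
    rw [ih _ node hL]
    by_cases h : node = n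
    · subst h
      simp [PySem.Dict.getD_insert_self, hn]
    · rw [PySem.Dict.getD_insert_of_ne _ _ _ h]
      simp [h]

-- buildNbrs's entry at node is the concatenation of the collections containing node
lemma getD_buildNbrs_go :
    ∀ (ncs : List (List Int)) (nbrs : PySem.Dict Int (List Int)) (node : Int),
      (ncs.foldl (fun nbrs collection =>
          (PySem.List.dedup collection).foldl
            (fun nbrs n => nbrs.insert n (nbrs.getD n [] ++ collection)) nbrs) nbrs).getD node []
        = nbrs.getD node [] ++ (ncs.filter (fun c => c.contains node)).flatten := by
  intro ncs
  induction ncs with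
  | nil => intro nbrs node; simp
  | cons col ncs ih =>
    intro nbrs node
    simp only [List.foldl_cons, List.filter_cons]
    rw [ih]
    rw [getD_inner_fold col (PySem.List.dedup col) nbrs node (PySem.List.nodup_dedup col)]
    have hcc : (PySem.List.dedup col).contains node = col.contains node := by
      simp [List.contains_eq_mem]
    rw [hcc]
    by_cases h : node ∈ col
    · simp [h, List.append_assoc]
    · simp [h]

lemma getD_buildNbrs (ncs : List (List Int)) (node : Int) :
    (buildNbrs ncs).getD node [] = (ncs.filter (fun c => c.contains node)).flatten := by
  unfold buildNbrs
  rw [getD_buildNbrs_go]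
  simp

lemma dfs_eq (ncs : List (List Int)) (bns ens : List Int) :
    ∀ (fuel : Nat) (node : Int) (path : List Int)
      (st : List (List Int) × PySem.Set Int),
      dfsA ncs bns ens fuel node path st = dfsB (buildNbrs ncs) bns ens fuel node path st := by
  intro fuel
  induction fuel with
  | zero => intro node path st; rfl
  | succ fuel ih =>
    intro node path st
    simp only [dfsA, dfsB, ih]
    rw [getD_buildNbrs, List.foldl_flatten, List.foldl_filter]
    by_cases hb : node ∈ bns
    · simp [hb]
    · by_cases he : node ∈ ens
      · simp [hb, he]
      · simp [hb, he]

-- ===== VERDICT =====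
theorem find_segments_v2_spec : Claim_equal_find_segments_v2 := by
  intro start_node ncs bns ens _
  unfold Spec_find_segments_v2 find_segments_v2 find_segments_v2_alt
  rw [dfs_eq]
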